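-- pv_equiv track=rewrite | github.com/krikun98/montgomery | galois.py | mon_square
-- ===== SOURCE A (Python) =====
-- def mon_square(a, irp=int("100011011", 2)):
--     c = 0
--     k = irp.bit_length()
--     for i in range(k-1):
--         c += (a & 1) << 2 * i
--         a >>= 1
--     for i in range(k-1):
--         if c & 1:
--             c ^= irp
--         c >>= 1
--     return c
-- ===== SOURCE B (Python) =====
-- def mon_square(a, irp=int("100011011", 2)):
--     m = irp.bit_length() - 1
--     if m < 0:
--         return 0
--     am = a & ((1 << m) - 1)
--     c = 0
--     for i in range(m):
--         if (am >> i) & 1: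
--             c ^= am
--         if c & 1:
--             c ^= irp
--         c >>= 1
--     return c
-- ===== Notes on version B (the rewrite author's own statement) =====
-- stated objective: alternative
-- what changed: Replaces A's two separate passes (spread a's low bits to even positions with adds and shifts, then run the reduction loop) by a one-pass bit-serial Montgomery multiplication of the masked operand by itself, interleaving the conditional XOR of the operand with each reduce-and-shift step and maintaining a single accumulator.
import Mathlib
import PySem

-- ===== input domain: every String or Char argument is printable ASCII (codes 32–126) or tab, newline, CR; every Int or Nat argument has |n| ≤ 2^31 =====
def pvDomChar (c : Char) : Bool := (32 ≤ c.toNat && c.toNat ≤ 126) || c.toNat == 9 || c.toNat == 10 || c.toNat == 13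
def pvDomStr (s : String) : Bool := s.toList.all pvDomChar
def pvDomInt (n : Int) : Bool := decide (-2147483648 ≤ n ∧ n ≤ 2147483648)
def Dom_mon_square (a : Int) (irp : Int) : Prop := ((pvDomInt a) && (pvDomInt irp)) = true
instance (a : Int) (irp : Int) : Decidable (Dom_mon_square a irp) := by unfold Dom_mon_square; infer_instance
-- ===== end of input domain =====

-- B replaces A's two passes (bit-spread, then reduction loop) by a single fused bit-serial
-- Montgomery pass over the masked operand; same asymptotic cost, different structure.

-- ===== PORT A =====
def mon_square (a : Int) (irp : Int) : Int :=
  let k := PySem.Int.bitLength irp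
  let ca := (List.range (k - 1)).foldl
    (fun (p : Int × Int) (i : Nat) => (p.1 + (PySem.Int.band p.2 1) <<< (2 * i), p.2 >>> (1:Nat)))
    ((0 : Int), a)
  (List.range (k - 1)).foldl
    (fun c _ => (if PySem.Int.band c 1 ≠ 0 then PySem.Int.bxor c irp else c) >>> (1:Nat))
    ca.1

-- ===== PORT B =====
def mon_square_alt (a : Int) (irp : Int) : Int :=
  let m : Int := (PySem.Int.bitLength irp : Int) - 1
  if m < 0 then 0
  else
    let am := PySem.Int.band a ((1:Int) <<< m.toNat - 1)
    (List.range m.toNat).foldl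
      (fun (c : Int) (i : Nat) =>
        let c := if PySem.Int.band (am >>> i) 1 ≠ 0 then PySem.Int.bxor c am else c
        let c := if PySem.Int.band c 1 ≠ 0 then PySem.Int.bxor c irp else c
        c >>> (1:Nat))
      0

-- ===== PRECONDITION & SPEC =====
def Spec_mon_square (a : Int) (irp : Int) (out : Int) : Prop := out = mon_square_alt a irp
instance (a : Int) (irp : Int) (out : Int) : Decidable (Spec_mon_square a irp out) := by unfold Spec_mon_square; infer_instance

-- ===== CLAIM (what is proved, stated in full; the proofs are below) =====
def Claim_equal_mon_square : Prop := ∀ (a : Int) (irp : Int), Dom_mon_square a irp → Spec_mon_square a irp (mon_square a irp)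

-- ===== LEMMAS AND PROOFS =====

def pvSg (x : Int) : Bool := decide (x < 0)
def pvCd (x : Int) : Nat := (if x < 0 then -x - 1 else x).toNat

theorem pvSg_natCast (n : Nat) : pvSg (n : Int) = false := by simp [pvSg]
theorem pvCd_natCast (n : Nat) : pvCd (n : Int) = n := by simp only [pvCd]; rw [if_neg (by omega)]; omega
theorem pvSg_negSucc (n : Nat) : pvSg (Int.negSucc n) = true := by simp [pvSg, Int.negSucc_eq]; omega
theorem pvCd_negSucc (n : Nat) : pvCd (Int.negSucc n) = n := by
  simp only [pvCd, Int.negSucc_eq]; rw [if_pos (by omega)]; omega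
theorem tnA (n : Nat) : ((n : Int)).toNat = n := Int.toNat_natCast n
theorem tnB (n : Nat) : (-Int.negSucc n - 1).toNat = n := by simp [Int.negSucc_eq]
theorem cA (n : Nat) : (0:Int) ≤ (n : Int) := by omega
theorem cB (n : Nat) : ¬ ((0:Int) ≤ Int.negSucc n) := by simp [Int.negSucc_eq]; omega

theorem bxor_norm (x y : Int) :
    PySem.Int.bxor x y = if pvSg x then (if pvSg y then ((pvCd x ^^^ pvCd y : Nat) : Int) else -((pvCd x ^^^ pvCd y : Nat) : Int) - 1)
      else (if pvSg y then -((pvCd x ^^^ pvCd y : Nat) : Int) - 1 else ((pvCd x ^^^ pvCd y : Nat) : Int)) := by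
  rcases x with m | m <;> rcases y with n | n <;>
    simp only [PySem.Int.bxor, pvSg_natCast, pvCd_natCast, pvSg_negSucc, pvCd_negSucc,
      Int.ofNat_eq_natCast, if_true, if_false, Bool.false_eq_true, tnA, tnB,
      if_pos (cA _), if_neg (cB _), ite_true, ite_false]

theorem pvSg_negCast (n : Nat) : pvSg (-(n : Int) - 1) = true := by simp [pvSg]; omega
theorem pvCd_negCast (n : Nat) : pvCd (-(n : Int) - 1) = n := by
  simp only [pvCd]; rw [if_pos (by omega)]; omega

theorem pvSg_bxor (x y : Int) : pvSg (PySem.Int.bxor x y) = xor (pvSg x) (pvSg y) := by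
  rw [bxor_norm]; cases hx : pvSg x <;> cases hy : pvSg y <;>
    simp [pvSg_natCast, pvSg_negCast]

theorem pvCd_bxor (x y : Int) : pvCd (PySem.Int.bxor x y) = pvCd x ^^^ pvCd y := by
  rw [bxor_norm]; cases hx : pvSg x <;> cases hy : pvSg y <;>
    simp [pvCd_natCast, pvCd_negCast]

theorem shrA (n : Nat) (k : Nat) : ((n : Int)) >>> k = ((n >>> k : Nat) : Int) := rfl
theorem shrB (n : Nat) (k : Nat) : (Int.negSucc n) >>> k = Int.negSucc (n >>> k) := rfl

theorem pvSg_shr (x : Int) (k : Nat) : pvSg (x >>> k) = pvSg x := by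
  rcases x with m | m
  · rw [Int.ofNat_eq_natCast, shrA, pvSg_natCast, pvSg_natCast]
  · rw [shrB, pvSg_negSucc, pvSg_negSucc]

theorem pvCd_shr (x : Int) (k : Nat) : pvCd (x >>> k) = pvCd x >>> k := by
  rcases x with m | m
  · rw [Int.ofNat_eq_natCast, shrA, pvCd_natCast, pvCd_natCast]
  · rw [shrB, pvCd_negSucc, pvCd_negSucc]

theorem pvExt {x y : Int} (hs : pvSg x = pvSg y) (hc : pvCd x = pvCd y) : x = y := by
  simp only [pvSg, pvCd] at hs hc
  rcases x with m | m <;> rcases y with n | n <;> simp_all [Int.negSucc_eq] <;> omega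

theorem pvSg_zero : pvSg 0 = false := rfl
theorem pvCd_zero : pvCd 0 = 0 := rfl
theorem pvSg_one : pvSg 1 = false := rfl
theorem pvCd_one : pvCd 1 = 1 := rfl

theorem pvBandOne (x : Int) :
    PySem.Int.band x 1 = ↑(if pvSg x then 1 - pvCd x % 2 else pvCd x % 2) := by
  rcases x with m | m
  · rw [Int.ofNat_eq_natCast]
    simp only [PySem.Int.band, pvSg_natCast, pvCd_natCast, if_false, Bool.false_eq_true]
    rw [if_pos (cA _), if_pos (by norm_num), tnA]
    norm_num [Nat.and_one_is_mod]
  · simp only [PySem.Int.band, pvSg_negSucc, pvCd_negSucc, if_true]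
    rw [if_neg (cB _), if_pos (by norm_num), tnB]
    norm_num [Nat.and_comm, Nat.and_one_is_mod]

theorem pvBandOne_cases (x : Int) : PySem.Int.band x 1 = 0 ∨ PySem.Int.band x 1 = 1 := by
  rw [pvBandOne]; split_ifs <;> omega

theorem pvBxor_comm (x y : Int) : PySem.Int.bxor x y = PySem.Int.bxor y x :=
  PySem.Int.bxor_comm x y

theorem pvBxor_assoc (x y z : Int) :
    PySem.Int.bxor (PySem.Int.bxor x y) z = PySem.Int.bxor x (PySem.Int.bxor y z) := by
  apply pvExt
  · simp only [pvSg_bxor]; cases pvSg x <;> cases pvSg y <;> cases pvSg z <;> rfl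
  · simp only [pvCd_bxor, Nat.xor_assoc]

theorem pvBxor_zero (x : Int) : PySem.Int.bxor x 0 = x := by
  apply pvExt
  · simp only [pvSg_bxor, pvSg_zero]; cases pvSg x <;> rfl
  · simp only [pvCd_bxor, pvCd_zero, Nat.xor_zero]

theorem pvBxor_zero_left (x : Int) : PySem.Int.bxor 0 x = x := by
  rw [pvBxor_comm, pvBxor_zero]

theorem pvBxor_self (x : Int) : PySem.Int.bxor x x = 0 := by
  apply pvExt
  · simp only [pvSg_bxor, pvSg_zero]; cases pvSg x <;> rfl
  · simp only [pvCd_bxor, pvCd_zero, Nat.xor_self]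

theorem pvBxor_left_comm (x y z : Int) :
    PySem.Int.bxor x (PySem.Int.bxor y z) = PySem.Int.bxor y (PySem.Int.bxor x z) := by
  rw [← pvBxor_assoc, pvBxor_comm x y, pvBxor_assoc]

theorem pvShr_bxor (x y : Int) (k : Nat) :
    (PySem.Int.bxor x y) >>> k = PySem.Int.bxor (x >>> k) (y >>> k) := by
  apply pvExt
  · rw [pvSg_shr, pvSg_bxor, pvSg_bxor, pvSg_shr, pvSg_shr]
  · rw [pvCd_shr, pvCd_bxor, pvCd_bxor, pvCd_shr, pvCd_shr]
    apply Nat.eq_of_testBit_eq; intro i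
    simp [Nat.testBit_shiftRight, Nat.testBit_xor]

theorem pvShr_add (x : Int) (s t : Nat) : x >>> (s + t) = (x >>> s) >>> t := by
  apply pvExt
  · rw [pvSg_shr, pvSg_shr, pvSg_shr]
  · rw [pvCd_shr, pvCd_shr, pvCd_shr, Nat.shiftRight_add]

theorem pvSg_two_mul (x : Int) : pvSg (2 * x) = pvSg x := by
  simp only [pvSg, decide_eq_decide]; omega

theorem pvCd_two_mul (x : Int) : pvCd (2 * x) = 2 * pvCd x + (if pvSg x then 1 else 0) := by
  simp only [pvCd, pvSg]; split_ifs with h1 h2 h3 <;> simp_all <;> omega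

theorem pvNatXorBits (a b s t : Nat) (hs : s ≤ 1) (ht : t ≤ 1) :
    (2 * a + s) ^^^ (2 * b + t) = 2 * (a ^^^ b) + (s ^^^ t) := by
  apply Nat.eq_of_testBit_eq; intro i
  cases i with
  | zero =>
    rw [Nat.testBit_xor]
    simp only [Nat.testBit_zero]
    rw [show (2 * a + s) % 2 = s by omega, show (2 * b + t) % 2 = t by omega,
      show (2 * (a ^^^ b) + (s ^^^ t)) % 2 = s ^^^ t by
        interval_cases s <;> interval_cases t <;> simp <;> omega]
    interval_cases s <;> interval_cases t <;> decide
  | succ i =>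
    rw [Nat.testBit_xor, Nat.testBit_add_one, Nat.testBit_add_one, Nat.testBit_add_one,
      show (2 * a + s) / 2 = a by omega, show (2 * b + t) / 2 = b by omega,
      show (2 * (a ^^^ b) + (s ^^^ t)) / 2 = a ^^^ b by
        interval_cases s <;> interval_cases t <;> simp <;> omega,
      Nat.testBit_xor]

theorem pvTwoMul_bxor (x y : Int) :
    2 * PySem.Int.bxor x y = PySem.Int.bxor (2 * x) (2 * y) := by
  apply pvExt
  · rw [pvSg_two_mul, pvSg_bxor, pvSg_bxor, pvSg_two_mul, pvSg_two_mul]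
  · rw [pvCd_two_mul, pvCd_bxor, pvCd_bxor, pvCd_two_mul, pvCd_two_mul,
      pvNatXorBits _ _ _ _ (by split <;> omega) (by split <;> omega), pvSg_bxor]
    cases pvSg x <;> cases pvSg y <;> simp

theorem pvAddLow (e w : Int) (he : e = 0 ∨ e = 1) : 2 * w + e = PySem.Int.bxor e (2 * w) := by
  rcases he with rfl | rfl
  · rw [pvBxor_zero_left]; ring
  · apply pvExt
    · rw [pvSg_bxor, pvSg_one, pvSg_two_mul]
      simp only [pvSg, decide_eq_decide]; cases h : decide (w < 0) <;> simp_all <;> omega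
    · rw [pvCd_bxor, pvCd_one, pvCd_two_mul]
      have h1 : pvCd (2 * w + 1) = 2 * pvCd w + (if pvSg w then 0 else 1) := by
        simp only [pvCd, pvSg]; split_ifs <;> simp_all <;> omega
      rw [h1, show (1 : Nat) = 2 * 0 + 1 by rfl, pvNatXorBits 0 _ 1 _ (by omega) (by split <;> omega)]
      cases pvSg w <;> simp

def pvStep (irp c : Int) : Int :=
  (if PySem.Int.band c 1 ≠ 0 then PySem.Int.bxor c irp else c) >>> (1:Nat)

theorem pvStep_bxor (irp u v : Int) :
    pvStep irp (PySem.Int.bxor u v) = PySem.Int.bxor (pvStep irp u) (pvStep irp v) := by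
  unfold pvStep
  have hb : PySem.Int.band (PySem.Int.bxor u v) 1 = 0 ↔
      (PySem.Int.band u 1 = 0 ↔ PySem.Int.band v 1 = 0) := by
    rw [pvBandOne, pvBandOne, pvBandOne, pvCd_bxor, pvSg_bxor]
    have := Nat.and_one_is_mod (pvCd u ^^^ pvCd v)
    rw [Nat.and_one_is_mod] at this
    have h2 : (pvCd u ^^^ pvCd v) % 2 = (pvCd u % 2 + pvCd v % 2) % 2 := by
      have e1 : pvCd u = 2 * (pvCd u / 2) + pvCd u % 2 := by omega
      have e2 : pvCd v = 2 * (pvCd v / 2) + pvCd v % 2 := by omega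
      rw [e1, e2, pvNatXorBits _ _ _ _ (by omega) (by omega)]
      have : pvCd u % 2 ≤ 1 := by omega
      have : pvCd v % 2 ≤ 1 := by omega
      interval_cases hu : pvCd u % 2 <;> interval_cases hv : pvCd v % 2 <;> simp <;> omega
    rw [h2]
    cases pvSg u <;> cases pvSg v <;> simp <;> omega
  rcases pvBandOne_cases u with hu | hu <;> rcases pvBandOne_cases v with hv | hv
  · rw [if_neg (by simp only [ne_eq, not_not]; rw [hb]; simp [hu, hv]), if_neg (by simp [hu]), if_neg (by simp [hv]),
      pvShr_bxor]
  · rw [if_pos (by rw [Ne, hb]; simp [hu, hv]), if_neg (by simp [hu]), if_pos (by simp [hv]),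
      pvBxor_assoc, pvShr_bxor]
  · rw [if_pos (by rw [Ne, hb]; simp [hu, hv]), if_pos (by simp [hu]), if_neg (by simp [hv]),
      pvBxor_comm u v, pvBxor_assoc, pvShr_bxor]
    exact pvBxor_comm _ _
  · rw [if_neg (by simp only [ne_eq, not_not]; rw [hb]; simp [hu, hv]), if_pos (by simp [hu]), if_pos (by simp [hv])]
    rw [pvShr_bxor, pvShr_bxor, pvShr_bxor, pvBxor_assoc, pvBxor_left_comm (irp >>> (1:Nat)),
      pvBxor_self, pvBxor_zero]

theorem pvBandOne_two_mul (x : Int) : PySem.Int.band (2 * x) 1 = 0 := by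
  rw [pvBandOne, pvSg_two_mul, pvCd_two_mul]
  cases h : pvSg x <;> simp <;> omega

theorem pvShr_one_two_mul (x : Int) : (2 * x) >>> (1:Nat) = x := by
  apply pvExt
  · rw [pvSg_shr, pvSg_two_mul]
  · rw [pvCd_shr, pvCd_two_mul, Nat.shiftRight_one]
    cases pvSg x <;> simp <;> omega

theorem pvStep_two_mul (irp x : Int) : pvStep irp (2 * x) = x := by
  unfold pvStep
  rw [if_neg (by simp [pvBandOne_two_mul]), pvShr_one_two_mul]

theorem pvStep_zero (irp : Int) : pvStep irp 0 = 0 := by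
  have h := pvStep_two_mul irp 0
  norm_num at h
  exact h

def pvRed (irp : Int) : Nat → Int → Int
  | 0, c => c
  | n + 1, c => pvRed irp n (pvStep irp c)

theorem pvRed_bxor (irp : Int) (n : Nat) (u v : Int) :
    pvRed irp n (PySem.Int.bxor u v) = PySem.Int.bxor (pvRed irp n u) (pvRed irp n v) := by
  induction n generalizing u v with
  | zero => rfl
  | succ n ih => rw [pvRed, pvStep_bxor, ih]; rfl

theorem pvRed_zero (irp : Int) (n : Nat) : pvRed irp n 0 = 0 := by
  induction n with
  | zero => rfl
  | succ n ih => rw [pvRed, pvStep_zero, ih]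

def pvSpr : Nat → Int → Int
  | 0, _ => 0
  | n + 1, x => PySem.Int.band x 1 + 4 * pvSpr n (x >>> (1:Nat))

def pvCl (v : Int) : Nat → Int → Int
  | 0, _ => 0
  | n + 1, u => PySem.Int.bxor (if PySem.Int.band u 1 ≠ 0 then v else 0)
      (2 * pvCl v n (u >>> (1:Nat)))

def pvBL (irp v : Int) : Nat → Int → Int → Int
  | 0, _, c => c
  | n + 1, u, c => pvBL irp v n (u >>> (1:Nat))
      (pvStep irp (if PySem.Int.band u 1 ≠ 0 then PySem.Int.bxor c v else c))

theorem pvBL_eq (irp v : Int) (n : Nat) (u c : Int) :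
    pvBL irp v n u c = PySem.Int.bxor (pvRed irp n c) (pvRed irp n (pvCl v n u)) := by
  induction n generalizing u c with
  | zero => rw [pvBL, pvRed, pvRed, pvCl, pvBxor_zero]
  | succ n ih =>
    rw [pvBL, ih, pvCl]
    have hc : (if PySem.Int.band u 1 ≠ 0 then PySem.Int.bxor c v else c) =
        PySem.Int.bxor c (if PySem.Int.band u 1 ≠ 0 then v else 0) := by
      split
      · rfl
      · rw [pvBxor_zero]
    rw [hc]
    show _ = PySem.Int.bxor (pvRed irp n (pvStep irp c))
      (pvRed irp n (pvStep irp (PySem.Int.bxor (if PySem.Int.band u 1 ≠ 0 then v else 0)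
        (2 * pvCl v n (u >>> (1:Nat))))))
    rw [pvStep_bxor, pvStep_bxor, pvStep_two_mul, pvRed_bxor, pvRed_bxor,
      pvBxor_assoc]

theorem pvBxor_mix (a b c d : Int) :
    PySem.Int.bxor (PySem.Int.bxor a b) (PySem.Int.bxor c d) =
      PySem.Int.bxor (PySem.Int.bxor a c) (PySem.Int.bxor b d) := by
  apply pvExt
  · simp only [pvSg_bxor]
    cases pvSg a <;> cases pvSg b <;> cases pvSg c <;> cases pvSg d <;> rfl
  · simp only [pvCd_bxor]
    apply Nat.eq_of_testBit_eq; intro i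
    simp only [Nat.testBit_xor]
    cases pvCd a |>.testBit i <;> cases pvCd b |>.testBit i <;>
      cases pvCd c |>.testBit i <;> cases pvCd d |>.testBit i <;> rfl

theorem pvCl_bxor (v w : Int) (n : Nat) (u : Int) :
    pvCl (PySem.Int.bxor v w) n u = PySem.Int.bxor (pvCl v n u) (pvCl w n u) := by
  induction n generalizing u with
  | zero => rw [pvCl, pvCl, pvCl, pvBxor_zero]
  | succ n ih =>
    rw [pvCl, pvCl, pvCl, ih, pvTwoMul_bxor,
      show (if PySem.Int.band u 1 ≠ 0 then PySem.Int.bxor v w else 0) =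
        PySem.Int.bxor (if PySem.Int.band u 1 ≠ 0 then v else 0)
          (if PySem.Int.band u 1 ≠ 0 then w else 0) by
        split
        · rfl
        · rw [pvBxor_zero],
      pvBxor_mix]

theorem pvCl_two_mul (w : Int) (n : Nat) (u : Int) :
    pvCl (2 * w) n u = 2 * pvCl w n u := by
  induction n generalizing u with
  | zero => rw [pvCl, pvCl]; ring
  | succ n ih =>
    rw [pvCl, pvCl, ih,
      show (if PySem.Int.band u 1 ≠ 0 then 2 * w else 0) =
        2 * (if PySem.Int.band u 1 ≠ 0 then w else 0) by split <;> ring,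
      show (2 : Int) * (2 * pvCl w n (u >>> (1:Nat))) = 2 * (2 * pvCl w n (u >>> (1:Nat))) from rfl,
      pvTwoMul_bxor, ← pvTwoMul_bxor]

theorem pvCl_zero (n : Nat) (u : Int) : pvCl 0 n u = 0 := by
  induction n generalizing u with
  | zero => rfl
  | succ n ih => rw [pvCl, ih, ite_self]; norm_num [pvBxor_zero]

theorem pvPowCast (n : Nat) : ((2:Int)^n - 1).toNat = 2^n - 1 := by
  have h : ((2:Int)^n) = ((2^n : Nat) : Int) := by push_cast; ring
  have h2 : (1:Nat) ≤ 2^n := Nat.one_le_two_pow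
  omega

theorem pvBandMask (u : Int) (n : Nat) :
    PySem.Int.band u ((2:Int) ^ n - 1) =
      ↑(if pvSg u then (2 ^ n - 1) - pvCd u % 2 ^ n else pvCd u % 2 ^ n) := by
  have hm : (0:Int) ≤ (2:Int)^n - 1 := by
    have : (1:Int) ≤ 2^n := one_le_pow₀ (by norm_num)
    omega
  rcases u with m | m
  · rw [Int.ofNat_eq_natCast]
    simp only [PySem.Int.band, pvSg_natCast, pvCd_natCast, if_false, Bool.false_eq_true]
    rw [if_pos (cA _), if_pos hm, tnA, pvPowCast, Nat.and_two_pow_sub_one_eq_mod]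
  · simp only [PySem.Int.band, pvSg_negSucc, pvCd_negSucc, if_true]
    rw [if_neg (cB _), if_pos hm, tnB, pvPowCast, Nat.and_comm, Nat.and_two_pow_sub_one_eq_mod]

theorem pvBandMask_succ (u : Int) (n : Nat) :
    PySem.Int.band u ((2:Int) ^ (n+1) - 1) =
      PySem.Int.band u 1 + 2 * PySem.Int.band (u >>> (1:Nat)) ((2:Int) ^ n - 1) := by
  rw [pvBandMask, pvBandMask, pvBandOne, pvSg_shr, pvCd_shr, Nat.shiftRight_one]
  have hd : pvCd u % 2 ^ (n+1) = pvCd u % 2 + 2 * (pvCd u / 2 % 2 ^ n) := by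
    rw [pow_succ, mul_comm (2^n) 2, Nat.mod_mul]
  have h1 : pvCd u / 2 % 2 ^ n < 2 ^ n := Nat.mod_lt _ (Nat.two_pow_pos n)
  have h2 : (1:Nat) ≤ 2 ^ n := Nat.one_le_two_pow
  have h3 : (2:Nat) ^ (n+1) = 2 * 2 ^ n := by rw [pow_succ]; ring
  cases pvSg u <;> simp only [if_true, if_false, Bool.false_eq_true] <;>
    rw [show ∀ A B : Nat, ((A:Int) + 2 * (B:Int)) = ((A + 2*B : Nat) : Int) by intros; push_cast; ring,
      Nat.cast_inj] <;> omega

theorem pvCl_one (n : Nat) (u : Int) : pvCl 1 n u = PySem.Int.band u ((2:Int) ^ n - 1) := by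
  induction n generalizing u with
  | zero =>
    rw [pvCl, pow_zero]
    norm_num
  | succ n ih =>
    rw [pvCl, ih, pvBandMask_succ u n,
      show (if PySem.Int.band u 1 ≠ 0 then (1:Int) else 0) = PySem.Int.band u 1 by
        rcases pvBandOne_cases u with h | h <;> simp [h],
      ← pvAddLow _ _ (pvBandOne_cases u)]
    ring

theorem pvDecomp (y : Int) : y = 2 * (y >>> (1:Nat)) + PySem.Int.band y 1 := by
  rcases y with m | m
  · rw [Int.ofNat_eq_natCast, shrA, pvBandOne, pvSg_natCast, pvCd_natCast]
    simp only [if_false, Bool.false_eq_true, Nat.shiftRight_one]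
    push_cast
    omega
  · rw [shrB, pvBandOne, pvSg_negSucc, pvCd_negSucc, if_pos rfl]
    simp only [Int.negSucc_eq, Nat.shiftRight_one]
    push_cast
    omega

theorem pvCast_eq (y : Int) (h : 0 ≤ y) : y = ↑(pvCd y) := by
  simp only [pvCd]; omega

theorem pvSg_false (y : Int) (h : 0 ≤ y) : pvSg y = false := by
  simp only [pvSg, decide_eq_false_iff_not]; omega

theorem pvBand_small (y : Int) (n : Nat) (h : 0 ≤ y) (hb : pvCd y < 2 ^ n) :
    PySem.Int.band y ((2:Int) ^ n - 1) = y := by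
  rw [pvBandMask, pvSg_false y h, if_neg (by simp), Nat.mod_eq_of_lt hb, ← pvCast_eq y h]

theorem pvShr_nonneg (y : Int) (h : 0 ≤ y) : 0 ≤ y >>> (1:Nat) := by
  have h2 := pvSg_shr y 1
  rw [pvSg_false y h] at h2
  simp only [pvSg, decide_eq_false_iff_not] at h2
  omega

theorem pvCl_self (n : Nat) (y : Int) (hy : 0 ≤ y) (hb : pvCd y < 2 ^ n) :
    pvCl y n y = pvSpr n y := by
  induction n generalizing y with
  | zero => rfl
  | succ n ih =>
    have hy1 : 0 ≤ y >>> (1:Nat) := pvShr_nonneg y hy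
    have hb1 : pvCd (y >>> (1:Nat)) < 2 ^ n := by
      rw [pvCd_shr, Nat.shiftRight_one]
      have : (2:Nat) ^ (n+1) = 2 * 2 ^ n := by rw [pow_succ]; ring
      omega
    have hy2 : y = PySem.Int.bxor (PySem.Int.band y 1) (2 * (y >>> (1:Nat))) := by
      rw [← pvAddLow _ _ (pvBandOne_cases y)]; exact pvDecomp y
    have hsub : ∀ u, pvCl y n u =
        PySem.Int.bxor (pvCl (PySem.Int.band y 1) n u) (2 * pvCl (y >>> (1:Nat)) n u) := by
      intro u
      conv_lhs => rw [hy2]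
      rw [pvCl_bxor, pvCl_two_mul]
    rw [pvCl, hsub, pvSpr, ih _ hy1 hb1]
    rcases pvBandOne_cases y with h0 | h1
    · rw [show (if PySem.Int.band y 1 ≠ 0 then y else 0) = 0 by simp [h0],
        h0, pvCl_zero, pvBxor_zero_left, pvBxor_zero_left]
      ring
    · rw [show (if PySem.Int.band y 1 ≠ 0 then y else 0) = y by simp [h1],
        h1, pvCl_one, pvBand_small _ _ hy1 hb1, pvTwoMul_bxor, ← pvBxor_assoc]
      have hxy : PySem.Int.bxor y (2 * (y >>> (1:Nat))) = 1 := by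
        nth_rewrite 1 [hy2]
        rw [h1, pvBxor_assoc, pvBxor_self, pvBxor_zero]
      rw [hxy, show (2:Int) * (2 * pvSpr n (y >>> (1:Nat))) = 2 * (2 * pvSpr n (y >>> (1:Nat))) from rfl,
        ← pvAddLow 1 _ (Or.inr rfl)]
      ring

theorem pvSpr_mask (n : Nat) (x : Int) :
    pvSpr n (PySem.Int.band x ((2:Int) ^ n - 1)) = pvSpr n x := by
  induction n generalizing x with
  | zero => rfl
  | succ n ih =>
    have h3 : (2:Nat) ^ (n+1) = 2 * 2 ^ n := by rw [pow_succ]; ring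
    have hd : pvCd x % 2 ^ (n+1) = pvCd x % 2 + 2 * (pvCd x / 2 % 2 ^ n) := by
      rw [pow_succ, mul_comm (2^n) 2, Nat.mod_mul]
    have h1 : pvCd x / 2 % 2 ^ n < 2 ^ n := Nat.mod_lt _ (Nat.two_pow_pos n)
    have h2 : (1:Nat) ≤ 2 ^ n := Nat.one_le_two_pow
    have e1 : PySem.Int.band (PySem.Int.band x ((2:Int) ^ (n+1) - 1)) 1 = PySem.Int.band x 1 := by
      rw [pvBandMask, pvBandOne, pvBandOne, pvSg_natCast, pvCd_natCast]
      simp only [if_false, Bool.false_eq_true]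
      congr 1
      cases pvSg x <;> simp only [if_true, if_false, Bool.false_eq_true] <;> omega
    have e2 : (PySem.Int.band x ((2:Int) ^ (n+1) - 1)) >>> (1:Nat) =
        PySem.Int.band (x >>> (1:Nat)) ((2:Int) ^ n - 1) := by
      rw [pvBandMask, pvBandMask, pvSg_shr, pvCd_shr, shrA, Nat.shiftRight_one, Nat.shiftRight_one]
      congr 1
      cases pvSg x <;> simp only [if_true, if_false, Bool.false_eq_true] <;> omega
    rw [pvSpr, pvSpr, e1, e2, ih]

theorem pvShr_zero (x : Int) : x >>> (0:Nat) = x := by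
  rcases x with m | m <;> rfl

theorem pvOneShl (n : Nat) : (1:Int) <<< n = 2 ^ n := by
  show ((1:Nat) <<< n : Nat) = ((2:Int))^n
  rw [Nat.one_shiftLeft]
  push_cast
  ring

theorem pvZeroShl (n : Nat) : (0:Int) <<< n = 0 := by
  show ((0:Nat) <<< n : Nat) = (0:Int)
  simp [Nat.shiftLeft_eq]

theorem pvShlBand (x : Int) (s : Nat) :
    (PySem.Int.band x 1) <<< (2 * s) = 4 ^ s * PySem.Int.band x 1 := by
  rcases pvBandOne_cases x with h | h <;> rw [h]
  · rw [pvZeroShl]; ring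
  · rw [pvOneShl, pow_mul]; norm_num

theorem pvSprFold (n : Nat) : ∀ (s : Nat) (c x : Int),
    ((List.range' s n).foldl
      (fun (p : Int × Int) (i : Nat) => (p.1 + (PySem.Int.band p.2 1) <<< (2 * i), p.2 >>> (1:Nat))) (c, x)) =
      (c + 4 ^ s * pvSpr n x, x >>> n) := by
  induction n with
  | zero => intro s c x; rw [pvSpr, pvShr_zero]; simp
  | succ n ih =>
    intro s c x
    rw [List.range'_succ, List.foldl_cons, ih, pvSpr]
    simp only [Prod.mk.injEq]
    refine ⟨?_, ?_⟩
    · rw [pvShlBand, pow_succ]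
      ring
    · rw [← pvShr_add]
      norm_num [Nat.add_comm]

theorem pvRed_step_comm (irp : Int) (n : Nat) (c : Int) :
    pvRed irp n (pvStep irp c) = pvStep irp (pvRed irp n c) := by
  induction n generalizing c with
  | zero => rfl
  | succ n ih => rw [pvRed, pvRed, ih]

theorem pvRedFold (irp : Int) (n : Nat) (c : Int) :
    (List.range n).foldl
      (fun c _ => (if PySem.Int.band c 1 ≠ 0 then PySem.Int.bxor c irp else c) >>> (1:Nat)) c =
      pvRed irp n c := by
  induction n with
  | zero => rfl
  | succ n ih =>
    rw [List.range_succ, List.foldl_append, ih, List.foldl_cons, List.foldl_nil,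
      show ((if PySem.Int.band (pvRed irp n c) 1 ≠ 0 then PySem.Int.bxor (pvRed irp n c) irp
        else (pvRed irp n c)) >>> (1:Nat)) = pvStep irp (pvRed irp n c) from rfl,
      ← pvRed_step_comm]
    rfl

theorem pvBLFold (irp v : Int) (n : Nat) : ∀ (s : Nat) (c : Int),
    (List.range' s n).foldl
      (fun (c : Int) (i : Nat) =>
        let c := if PySem.Int.band (v >>> i) 1 ≠ 0 then PySem.Int.bxor c v else c
        let c := if PySem.Int.band c 1 ≠ 0 then PySem.Int.bxor c irp else c
        c >>> (1:Nat)) c =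
      pvBL irp v n (v >>> s) c := by
  induction n with
  | zero => intro s c; rfl
  | succ n ih =>
    intro s c
    rw [List.range'_succ, List.foldl_cons, ih, pvBL, ← pvShr_add]
    rfl

theorem pvAm_nonneg (a : Int) (n : Nat) : 0 ≤ PySem.Int.band a ((2:Int) ^ n - 1) := by
  rw [pvBandMask]
  positivity

theorem pvAm_lt (a : Int) (n : Nat) : pvCd (PySem.Int.band a ((2:Int) ^ n - 1)) < 2 ^ n := by
  rw [pvBandMask]
  have h2 : (1:Nat) ≤ 2 ^ n := Nat.one_le_two_pow
  have h1 : pvCd a % 2 ^ n < 2 ^ n := Nat.mod_lt _ (Nat.two_pow_pos n)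
  cases pvSg a <;> simp only [if_true, if_false, Bool.false_eq_true, pvCd_natCast] <;> omega

theorem pvRedFold' (irp : Int) (n : Nat) (c : Int) :
    (List.range' 0 n).foldl
      (fun c _ => (if PySem.Int.band c 1 ≠ 0 then PySem.Int.bxor c irp else c) >>> (1:Nat)) c =
      pvRed irp n c := by
  rw [← List.range_eq_range']
  exact pvRedFold irp n c

theorem pvMain (a irp : Int) : mon_square a irp = mon_square_alt a irp := by
  unfold mon_square mon_square_alt
  by_cases hk0 : PySem.Int.bitLength irp = 0
  · rw [hk0]
    norm_num
  · dsimp only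
    rw [if_neg (by omega)]
    have htn : ((PySem.Int.bitLength irp : Int) - 1).toNat = PySem.Int.bitLength irp - 1 := by omega
    rw [htn, List.range_eq_range', pvSprFold, pvOneShl]
    dsimp only
    rw [pvRedFold', pvBLFold, pvShr_zero, pvBL_eq, pvRed_zero, pvBxor_zero_left,
      pvCl_self _ _ (pvAm_nonneg a _) (pvAm_lt a _), pvSpr_mask]
    norm_num

-- ===== VERDICT (by name: the statement is the Claim_ definition above) =====
theorem mon_square_spec : Claim_equal_mon_square := by
  intro a irp _
  unfold Spec_mon_square
  exact pvMain a irp
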